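-- pv_equiv track=rewrite | github.com/JeffLabonte/anki_swiss_knife | anki_swiss_knife/language_extractors.py | get_indexes_of_words_to_keep_in_phrase
-- ===== SOURCE A (Python) =====
-- from collections import namedtuple
-- from typing import List, Set, Tuple
--
-- WordPosition = namedtuple("WordPosition", ["start_index", "end_index"])
--
-- def get_indexes_of_words_to_keep_in_phrase(
--     phrase: str,
--     words_to_keep: Set[str],
-- ) -> List[WordPosition]:
--     list_of_index = []
--     for name in words_to_keep:
--         if name in phrase:
--             start_index = phrase.index(name)
--             end_index = start_index + (len(name) - 1)
--             list_of_index.append(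
--                 WordPosition(
--                     start_index=start_index,
--                     end_index=end_index,
--                 )
--             )
--     return list_of_index
-- ===== SOURCE B (Python) =====
-- from collections import namedtuple
--
-- WordPosition = namedtuple("WordPosition", ["start_index", "end_index"])
--
-- def get_indexes_of_words_to_keep_in_phrase(phrase, words_to_keep):
--     # Scan the phrase left to right once; at each start position record the words
--     # that begin there, dropping each word from the search as soon as it is found.
--     pending = list(words_to_keep)
--     first_start = {}
--     for i in range(len(phrase) + 1):
--         if not pending:
--             break
--         still_pending = []
--         for word in pending:
--             if phrase.startswith(word, i):
--                 first_start[word] = i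
--             else:
--                 still_pending.append(word)
--         pending = still_pending
--     return [
--         WordPosition(first_start[word], first_start[word] + len(word) - 1)
--         for word in words_to_keep
--         if word in first_start
--     ]
-- ===== Notes on version B (the rewrite author's own statement) =====
-- stated objective: alternative
-- what changed: Instead of a substring test plus a second scan with phrase.index for every word, B makes a single left-to-right sweep over the phrase's start positions, recording each word the first time it starts there and dropping it from the pending set, then emits the spans in word order.
import Mathlib
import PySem

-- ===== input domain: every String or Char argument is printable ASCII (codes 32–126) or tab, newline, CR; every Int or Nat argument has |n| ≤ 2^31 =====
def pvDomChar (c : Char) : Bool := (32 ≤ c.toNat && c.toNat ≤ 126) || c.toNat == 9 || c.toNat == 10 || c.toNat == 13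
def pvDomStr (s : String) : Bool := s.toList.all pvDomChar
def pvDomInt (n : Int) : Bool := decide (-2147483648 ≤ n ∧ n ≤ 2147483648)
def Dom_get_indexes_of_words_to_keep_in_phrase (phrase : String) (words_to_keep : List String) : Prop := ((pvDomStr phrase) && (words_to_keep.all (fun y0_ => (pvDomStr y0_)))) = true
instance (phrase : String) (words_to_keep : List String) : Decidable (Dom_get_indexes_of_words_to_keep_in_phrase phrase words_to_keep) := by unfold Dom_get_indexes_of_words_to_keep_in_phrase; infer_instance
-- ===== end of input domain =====

-- B replaces per-word substring search (in + .index) by one left-to-right sweep over the phrase's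
-- start positions with a shrinking pending list, then projects the table in word order (alternative).


-- ===== PORT A =====
def get_indexes_of_words_to_keep_in_phrase (phrase : String) (words_to_keep : List String) : List (Int × Int) :=
  words_to_keep.foldl (fun list_of_index name =>
    if PySem.Str.isIn name phrase then
      let start_index := PySem.Str.find phrase name
      list_of_index ++ [(start_index, start_index + ((PySem.Str.len name : Int) - 1))]
    else list_of_index) []

-- ===== PORT B =====
-- inner loop of Source B: 'for word in pending: if phrase.startswith(word, i): first_start[word] = i
-- else: still_pending.append(word)'. Python's phrase.startswith(word, i) with 0 <= i <= len(phrase)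
-- is exactly 'word is a prefix of phrase[i:]'.
def pvBInner (cs : List Char) (i : Nat) (pending : List String) (d : PySem.Dict String Int) :
    PySem.Dict String Int × List String :=
  pending.foldl (fun acc word =>
    if PySem.Chars.startswith (cs.drop i) word.toList then (acc.1.insert word (i : Int), acc.2)
    else (acc.1, acc.2 ++ [word])) (d, [])

-- outer loop of Source B: 'for i in range(len(phrase) + 1): if not pending: break; ...'
def pvBLoop (cs : List Char) (ps : List Nat) (d : PySem.Dict String Int)
    (pending : List String) : PySem.Dict String Int :=
  match ps with
  | [] => d
  | i :: rest =>
    if pending.isEmpty then d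
    else
      let st := pvBInner cs i pending d
      pvBLoop cs rest st.1 st.2

def get_indexes_of_words_to_keep_in_phrase_alt (phrase : String) (words_to_keep : List String) : List (Int × Int) :=
  let cs := phrase.toList
  let first_start := pvBLoop cs (List.range (cs.length + 1)) PySem.Dict.empty words_to_keep
  words_to_keep.filterMap (fun word =>
    (first_start.get? word).map (fun s => (s, s + (PySem.Str.len word : Int) - 1)))

-- ===== PRECONDITION & SPEC =====
def Spec_get_indexes_of_words_to_keep_in_phrase (phrase : String) (words_to_keep : List String) (out : List (Int × Int)) : Prop := out = get_indexes_of_words_to_keep_in_phrase_alt phrase words_to_keep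
instance (phrase : String) (words_to_keep : List String) (out : List (Int × Int)) : Decidable (Spec_get_indexes_of_words_to_keep_in_phrase phrase words_to_keep out) := by unfold Spec_get_indexes_of_words_to_keep_in_phrase; infer_instance

-- ===== CLAIM (what is proved, stated in full; the proofs are below) =====
def Claim_equal_get_indexes_of_words_to_keep_in_phrase : Prop := ∀ (phrase : String) (words_to_keep : List String), Dom_get_indexes_of_words_to_keep_in_phrase phrase words_to_keep → Spec_get_indexes_of_words_to_keep_in_phrase phrase words_to_keep (get_indexes_of_words_to_keep_in_phrase phrase words_to_keep)

-- ===== LEMMAS AND PROOFS =====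

-- 'some start position j < i of the phrase begins word w' (the words already found when the sweep reaches i)
def pvFB (cs : List Char) (i : Nat) (w : String) : Bool :=
  (List.range i).any (fun j => PySem.Chars.startswith (cs.drop j) w.toList)

lemma pvFB_zero (cs : List Char) (w : String) : pvFB cs 0 w = false := by simp [pvFB]

lemma pvFB_succ (cs : List Char) (i : Nat) (w : String) :
    pvFB cs (i + 1) w = (pvFB cs i w || PySem.Chars.startswith (cs.drop i) w.toList) := by
  simp [pvFB, List.range_succ]

lemma pvFB_mono (cs : List Char) {i i' : Nat} (h : i ≤ i') (w : String)
    (hfb : pvFB cs i w = true) : pvFB cs i' w = true := by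
  simp only [pvFB, List.any_eq_true, List.mem_range] at hfb ⊢
  obtain ⟨j, hj, hp⟩ := hfb
  exact ⟨j, by omega, hp⟩

lemma pvFB_iff (cs : List Char) (i : Nat) (w : String) :
    pvFB cs i w = true ↔ ∃ j, j < i ∧ w.toList <+: cs.drop j := by
  simp only [pvFB, List.any_eq_true, List.mem_range]
  constructor
  · rintro ⟨j, hj, hp⟩; exact ⟨j, hj, (PySem.Chars.startswith_iff _ _).1 hp⟩
  · rintro ⟨j, hj, hp⟩; exact ⟨j, hj, (PySem.Chars.startswith_iff _ _).2 hp⟩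

lemma pvBInner_snd (cs : List Char) (i : Nat) (pending : List String)
    (d : PySem.Dict String Int) (acc : List String) :
    (pending.foldl (fun acc word =>
      if PySem.Chars.startswith (cs.drop i) word.toList then (acc.1.insert word (i : Int), acc.2)
      else (acc.1, acc.2 ++ [word])) (d, acc)).2
    = acc ++ pending.filter (fun w => ! PySem.Chars.startswith (cs.drop i) w.toList) := by
  induction pending generalizing d acc with
  | nil => simp
  | cons x rest ih =>
    by_cases hx : PySem.Chars.startswith (cs.drop i) x.toList
    · simp [hx, ih]
    · simp [hx, ih]

lemma pvBInner_fst_get (cs : List Char) (i : Nat) (pending : List String)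
    (d : PySem.Dict String Int) (acc : List String) (w : String) :
    ((pending.foldl (fun acc word =>
      if PySem.Chars.startswith (cs.drop i) word.toList then (acc.1.insert word (i : Int), acc.2)
      else (acc.1, acc.2 ++ [word])) (d, acc)).1).get? w
    = if w ∈ pending ∧ w.toList <+: cs.drop i then some (i : Int) else d.get? w := by
  induction pending generalizing d acc with
  | nil => simp
  | cons x rest ih =>
    simp only [List.foldl_cons]
    by_cases hx : PySem.Chars.startswith (cs.drop i) x.toList
    · rw [if_pos hx, ih]
      by_cases hr : w ∈ rest ∧ w.toList <+: cs.drop i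
      · rw [if_pos hr, if_pos ⟨List.mem_cons_of_mem _ hr.1, hr.2⟩]
      · rw [if_neg hr, PySem.Dict.get?_insert]
        by_cases hwx : w = x
        · subst hwx
          have hpre : w.toList <+: cs.drop i := (PySem.Chars.startswith_iff _ _).1 hx
          simp [hpre]
        · rw [if_neg hwx, if_neg (by
            rintro ⟨hm, hp⟩
            rcases List.mem_cons.1 hm with h | h
            · exact hwx h
            · exact hr ⟨h, hp⟩)]
    · rw [if_neg hx, ih]
      have hxp : ¬ x.toList <+: cs.drop i := fun hp => hx ((PySem.Chars.startswith_iff _ _).2 hp)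
      by_cases hr : w ∈ rest ∧ w.toList <+: cs.drop i
      · rw [if_pos hr, if_pos ⟨List.mem_cons_of_mem _ hr.1, hr.2⟩]
      · rw [if_neg hr, if_neg (by
          rintro ⟨hm, hp⟩
          rcases List.mem_cons.1 hm with h | h
          · exact hxp (h ▸ hp)
          · exact hr ⟨h, hp⟩)]

-- main sweep invariant: after processing positions i, i+1, …, i+m-1 the table maps every word of
-- 'words' that occurs in the phrase before position i+m to its first occurrence
lemma pvBLoop_get (cs : List Char) (words : List String) (m : Nat) :
    ∀ (i : Nat) (d : PySem.Dict String Int),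
      i + m ≤ cs.length + 1 →
      (∀ w ∈ words, d.get? w = if pvFB cs i w then some (PySem.Chars.find cs w.toList) else none) →
      ∀ w ∈ words,
        (pvBLoop cs (List.range' i m) d (words.filter (fun w => ! pvFB cs i w))).get? w
          = if pvFB cs (i + m) w then some (PySem.Chars.find cs w.toList) else none := by
  induction m with
  | zero =>
    intro i d _ hd w hw
    simpa [pvBLoop] using hd w hw
  | succ m ih =>
    intro i d hle hd w hw
    rw [List.range'_succ, pvBLoop]
    by_cases hemp : (words.filter (fun w => ! pvFB cs i w)).isEmpty
    · rw [if_pos hemp]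
      have hall : ∀ v ∈ words, pvFB cs i v = true := by
        intro v hv
        by_contra hno
        have : v ∈ words.filter (fun w => ! pvFB cs i w) :=
          List.mem_filter.2 ⟨hv, by simp [hno]⟩
        rw [List.isEmpty_iff.1 hemp] at this
        exact absurd this (List.not_mem_nil)
      rw [hd w hw, if_pos (hall w hw), if_pos (pvFB_mono cs (by omega) w (hall w hw))]
    · rw [if_neg hemp]
      have hsnd : (pvBInner cs i (words.filter (fun w => ! pvFB cs i w)) d).2
          = words.filter (fun w => ! pvFB cs (i + 1) w) := by
        rw [pvBInner, pvBInner_snd, List.nil_append, List.filter_filter]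
        congr 1
        funext v
        rw [pvFB_succ]
        cases h1 : pvFB cs i v <;> cases h2 : PySem.Chars.startswith (cs.drop i) v.toList <;> simp
      have hfst : ∀ v ∈ words,
          (pvBInner cs i (words.filter (fun w => ! pvFB cs i w)) d).1.get? v
          = if pvFB cs (i + 1) v then some (PySem.Chars.find cs v.toList) else none := by
        intro v hv
        rw [pvBInner, pvBInner_fst_get]
        by_cases hm : v ∈ words.filter (fun w => ! pvFB cs i w) ∧ v.toList <+: cs.drop i
        · rw [if_pos hm]
          have hfbF : pvFB cs i v = false := by
            have := (List.mem_filter.1 hm.1).2; simpa using this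
          have hfb1 : pvFB cs (i + 1) v = true := by
            rw [pvFB_succ, hfbF, Bool.false_or]
            exact (PySem.Chars.startswith_iff _ _).2 hm.2
          rw [if_pos hfb1]
          -- v first occurs exactly at i
          have hno : ∀ j < i, ¬ v.toList <+: cs.drop j := by
            intro j hj hp
            have : pvFB cs i v = true := (pvFB_iff cs i v).2 ⟨j, hj, hp⟩
            rw [hfbF] at this; exact absurd this (by simp)
          have hIn : PySem.Chars.isIn v.toList cs = true :=
            (PySem.Chars.exists_prefix_drop_iff_isIn v.toList cs).1 ⟨i, hm.2⟩
          have hnn : 0 ≤ PySem.Chars.find cs v.toList :=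
            (PySem.Chars.find_nonneg_iff cs v.toList).2 ((PySem.Chars.isIn_iff_infix _ _).1 hIn)
          obtain ⟨hpre, hmin⟩ := PySem.Chars.find_spec hnn
          have h1 : (PySem.Chars.find cs v.toList).toNat ≤ i := by
            by_contra h
            exact hmin i (by omega) hm.2
          have h2 : ¬ (PySem.Chars.find cs v.toList).toNat < i := fun h => hno _ h hpre
          have : (PySem.Chars.find cs v.toList).toNat = i := by omega
          congr 1
          omega
        · rw [if_neg hm, hd v hv, pvFB_succ]
          by_cases hfb : pvFB cs i v
          · simp [hfb]
          · have hfbF : pvFB cs i v = false := by simpa using hfb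
            rw [hfbF, Bool.false_or, if_neg (by simp),
              if_neg (fun hc => hm ⟨List.mem_filter.2 ⟨hv, by simp [hfbF]⟩,
                (PySem.Chars.startswith_iff _ _).1 hc⟩)]
      have hIH := ih (i + 1) (pvBInner cs i (words.filter (fun w => ! pvFB cs i w)) d).1
        (by omega) hfst w hw
      rw [show i + 1 + m = i + (m + 1) from by omega] at hIH
      show (pvBLoop cs (List.range' (i + 1) m)
          (pvBInner cs i (words.filter (fun w => ! pvFB cs i w)) d).1
          (pvBInner cs i (words.filter (fun w => ! pvFB cs i w)) d).2).get? w = _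
      rw [hsnd]
      exact hIH

lemma pvScan_get (cs : List Char) (words : List String) (w : String) (hw : w ∈ words) :
    (pvBLoop cs (List.range (cs.length + 1)) PySem.Dict.empty words).get? w =
      if PySem.Chars.isIn w.toList cs then some (PySem.Chars.find cs w.toList) else none := by
  have hpend : words = words.filter (fun w => ! pvFB cs 0 w) := by
    simp [pvFB_zero]
  have h := pvBLoop_get cs words (cs.length + 1) 0 PySem.Dict.empty (by omega)
    (by intro v _; simp [pvFB_zero, PySem.Dict.get?_empty]) w hw
  rw [← hpend] at h
  rw [List.range_eq_range', h]
  have hiff : pvFB cs (0 + (cs.length + 1)) w = true ↔ PySem.Chars.isIn w.toList cs = true := by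
    rw [pvFB_iff]
    constructor
    · rintro ⟨j, -, hp⟩
      exact (PySem.Chars.exists_prefix_drop_iff_isIn w.toList cs).1 ⟨j, hp⟩
    · intro h
      obtain ⟨j, hp⟩ := (PySem.Chars.exists_prefix_drop_iff_isIn w.toList cs).2 h
      refine ⟨min j cs.length, by omega, ?_⟩
      by_cases hj : j ≤ cs.length
      · rwa [Nat.min_eq_left hj]
      · rw [Nat.min_eq_right (by omega)]
        have : cs.drop j = [] := List.drop_eq_nil_of_le (by omega)
        rw [this] at hp
        simp [List.prefix_nil.1 hp]
  by_cases h : PySem.Chars.isIn w.toList cs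
  · rw [if_pos (hiff.2 h), if_pos h]
  · rw [if_neg (fun hc => h (hiff.1 hc)), if_neg h]

lemma pvFoldl_filterMap (l : List String) (q : String → Bool) (f : String → Int × Int)
    (dget : String → Option (Int × Int)) (acc : List (Int × Int))
    (h : ∀ w ∈ l, dget w = if q w then some (f w) else none) :
    l.foldl (fun a w => if q w then a ++ [f w] else a) acc = acc ++ l.filterMap dget := by
  induction l generalizing acc with
  | nil => simp
  | cons x rest ih =>
    rw [List.foldl_cons, List.filterMap_cons,
        ih _ (fun w hw => h w (List.mem_cons_of_mem _ hw)), h x List.mem_cons_self]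
    by_cases hx : q x
    · simp [hx]
    · simp [hx]

-- ===== VERDICT (by name: the statement is the Claim_ definition above) =====
theorem get_indexes_of_words_to_keep_in_phrase_spec : Claim_equal_get_indexes_of_words_to_keep_in_phrase := by
  intro phrase words _
  unfold Spec_get_indexes_of_words_to_keep_in_phrase
  rw [get_indexes_of_words_to_keep_in_phrase, get_indexes_of_words_to_keep_in_phrase_alt]
  have h : ∀ w ∈ words, ((pvBLoop phrase.toList (List.range (phrase.toList.length + 1))
          PySem.Dict.empty words).get? w).map
        (fun s => (s, s + (PySem.Str.len w : Int) - 1))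
      = if PySem.Str.isIn w phrase then
          some (PySem.Str.find phrase w, PySem.Str.find phrase w + ((PySem.Str.len w : Int) - 1))
        else none := by
    intro w hw
    rw [pvScan_get _ _ _ hw]
    by_cases hin : PySem.Chars.isIn w.toList phrase.toList
    · simp only [if_pos hin, Option.map_some]
      rw [if_pos (by simpa [PySem.Str.isIn_eq] using hin)]
      simp [PySem.Str.find_eq, add_sub_assoc]
    · simp only [if_neg hin, Option.map_none]
      rw [if_neg (by simpa [PySem.Str.isIn_eq] using hin)]
  exact (pvFoldl_filterMap words _ _ _ [] h).trans (by simp)
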